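-- pv_equiv track=rewrite | github.com/MagdaCzapiewska/SDCC_compiler_HTML_CSS_JavaScript_Python_Django | compilator_8_bit/compiler/api/parser.py | __count_brackets
-- ===== SOURCE A (Python) =====
-- def __count_brackets(match, bracket_type):
--     brackets = 0
--     for bracket in match:
--         if bracket == bracket_type:
--             brackets+=1
--         else:
--             brackets-=1
--     return brackets
-- ===== SOURCE B (Python) =====
-- def __count_brackets(match, bracket_type):
--     # Divide and conquer: the score of a string is the sum of the scores of its halves.
--     if len(match) == 0:
--         return 0
--     if len(match) == 1:
--         return 1 if match == bracket_type else -1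
--     mid = len(match) // 2
--     return __count_brackets(match[:mid], bracket_type) + __count_brackets(match[mid:], bracket_type)
-- ===== Notes on version B (the rewrite author's own statement) =====
-- stated objective: alternative
-- what changed: Replaces the left-to-right +1/-1 accumulating loop with a divide-and-conquer recursion: split the string in two halves, score each half recursively, and add the results; the base case scores a single character.
import Mathlib
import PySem

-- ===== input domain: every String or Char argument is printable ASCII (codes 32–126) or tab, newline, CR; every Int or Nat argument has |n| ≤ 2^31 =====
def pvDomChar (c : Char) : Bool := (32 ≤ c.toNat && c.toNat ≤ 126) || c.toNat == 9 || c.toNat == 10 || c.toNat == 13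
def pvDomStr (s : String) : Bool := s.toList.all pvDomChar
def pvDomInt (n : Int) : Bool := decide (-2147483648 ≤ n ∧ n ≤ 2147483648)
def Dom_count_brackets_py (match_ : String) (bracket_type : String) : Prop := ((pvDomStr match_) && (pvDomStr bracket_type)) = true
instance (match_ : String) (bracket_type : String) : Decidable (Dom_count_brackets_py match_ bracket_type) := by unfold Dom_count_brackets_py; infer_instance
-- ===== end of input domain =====

-- ===== PORT A =====
-- B replaces A's left-to-right +1/-1 accumulator loop by a divide-and-conquer recursion on halves (objective: alternative)
def count_brackets_py (match_ : String) (bracket_type : String) : Int :=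
  match_.toList.foldl
    (fun brackets bracket =>
      if String.mk [bracket] == bracket_type then brackets + 1 else brackets - 1)
    0

-- ===== PORT B =====
def cbDivide (bt : String) (l : List Char) : Int :=
  if l.length = 0 then 0
  else if l.length = 1 then (if String.mk l == bt then 1 else -1)
  else cbDivide bt (l.take (l.length / 2)) + cbDivide bt (l.drop (l.length / 2))
termination_by l.length
decreasing_by
  · simp only [List.length_take]; omega
  · simp only [List.length_drop]; omega

def count_brackets_py_alt (match_ : String) (bracket_type : String) : Int :=
  cbDivide bracket_type match_.toList

-- ===== PRECONDITION & SPEC =====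
def Spec_count_brackets_py (match_ : String) (bracket_type : String) (out : Int) : Prop := out = count_brackets_py_alt match_ bracket_type
instance (match_ : String) (bracket_type : String) (out : Int) : Decidable (Spec_count_brackets_py match_ bracket_type out) := by unfold Spec_count_brackets_py; infer_instance

-- ===== CLAIM (what is proved, stated in full; the proofs are below) =====
def Claim_equal_count_brackets_py : Prop := ∀ (match_ : String) (bracket_type : String), Dom_count_brackets_py match_ bracket_type → Spec_count_brackets_py match_ bracket_type (count_brackets_py match_ bracket_type)

-- ===== LEMMAS AND PROOFS =====
def cbScore (bt : String) (l : List Char) : Int :=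
  (l.map (fun c => if String.mk [c] == bt then (1 : Int) else -1)).sum

theorem cbScore_append (bt : String) (l₁ l₂ : List Char) :
    cbScore bt (l₁ ++ l₂) = cbScore bt l₁ + cbScore bt l₂ := by
  simp [cbScore]

theorem foldl_eq_score (bt : String) (l : List Char) (a : Int) :
    l.foldl (fun brackets bracket =>
      if String.mk [bracket] == bt then brackets + 1 else brackets - 1) a
      = a + cbScore bt l := by
  induction l generalizing a with
  | nil => simp [cbScore]
  | cons c l ih =>
    simp only [List.foldl_cons, ih, cbScore, List.map_cons, List.sum_cons]
    by_cases h : (String.mk [c] == bt) = true <;> simp [h] <;> ring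

theorem cbDivide_eq_score (bt : String) (l : List Char) :
    cbDivide bt l = cbScore bt l := by
  induction l using (fun motive ih l => Nat.strongRecOn (motive := fun n => ∀ l : List Char, l.length = n → motive l) l.length (fun n ihn l h => ih l (fun l' h' => ihn l'.length (h ▸ h') l' rfl)) l rfl :
      ∀ motive : List Char → Prop,
        (∀ l, (∀ l' : List Char, l'.length < l.length → motive l') → motive l) → ∀ l, motive l) with
  | _ l ih =>
    rw [cbDivide]
    split
    · next h => simp [List.length_eq_zero_iff.mp h, cbScore]
    · split
      · next h0 h1 =>
        match l, h1 with
        | [c], _ => simp [cbScore]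
      · next h0 h1 =>
        rw [ih (l.take (l.length / 2)) (by simp [List.length_take]; omega),
            ih (l.drop (l.length / 2)) (by simp [List.length_drop]; omega),
            ← cbScore_append, List.take_append_drop]

-- ===== VERDICT (by name: the statement is the Claim_ definition above) =====
theorem count_brackets_py_spec : Claim_equal_count_brackets_py := by
  intro m bt _
  unfold Spec_count_brackets_py count_brackets_py count_brackets_py_alt
  rw [foldl_eq_score, cbDivide_eq_score]
  ring
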